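-- pv_equiv track=rewrite | github.com/msabhinavchandra/leetcode | arrays/9.Maximum Sum With Exactly K Elements.py | maximizeSum
-- ===== SOURCE A (Python) =====
-- def maximizeSum(nums, k):
--     if 1<=k<=100:
--         pass
--         summ=0
--         if 1<=len(nums)<=100:
--             pass
--             for i in range(len(nums)):
--                 if 1<=nums[i]<=100:
--                     pass
--                 else:
--                     return 0
--                 for j in range(k):
--                     # v=len(nums)-1
--                     # g=nums[v]
--                     k=max(nums)+j
--                     summ=summ+k
--                     # nums[v]=g+1
--                     k=k+1
--                     # nums.replace(g,g+1)
--
--                 return summ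
--
--
--         else:
--             return 0
--     else:
--         return 0
-- ===== SOURCE B (Python) =====
-- def maximizeSum(nums, k):
--     # B: validate k, length, and ALL elements; then closed form k*max + k*(k-1)//2.
--     if not (1 <= k <= 100 and 1 <= len(nums) <= 100):
--         return 0
--     if any(not (1 <= x <= 100) for x in nums):
--         return 0
--     return k * max(nums) + k * (k - 1) // 2
-- ===== Notes on version B (the rewrite author's own statement) =====
-- stated objective: simpler
-- what changed: Replaces the loop machinery (outer index loop with early returns, inner loop that mutates k and re-scans nums with max() each round) by one max pass and the closed form k*max + k*(k-1)//2, validating every element (A's early return only ever checks nums[0]).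
-- intended difference: On inputs with 1<=k<=100, 1<=len(nums)<=100, 1<=nums[0]<=100 but some later element outside [1,100], A's early return skips validating those elements and returns k*max(nums)+k*(k-1)/2, while B returns 0; B's is intended because A's own code means to reject any element outside [1,100] but its loop returns before checking indices past 0. — e.g. on maximizeSum([2, 200], 3): A returns 603, B returns 0
import Mathlib
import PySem

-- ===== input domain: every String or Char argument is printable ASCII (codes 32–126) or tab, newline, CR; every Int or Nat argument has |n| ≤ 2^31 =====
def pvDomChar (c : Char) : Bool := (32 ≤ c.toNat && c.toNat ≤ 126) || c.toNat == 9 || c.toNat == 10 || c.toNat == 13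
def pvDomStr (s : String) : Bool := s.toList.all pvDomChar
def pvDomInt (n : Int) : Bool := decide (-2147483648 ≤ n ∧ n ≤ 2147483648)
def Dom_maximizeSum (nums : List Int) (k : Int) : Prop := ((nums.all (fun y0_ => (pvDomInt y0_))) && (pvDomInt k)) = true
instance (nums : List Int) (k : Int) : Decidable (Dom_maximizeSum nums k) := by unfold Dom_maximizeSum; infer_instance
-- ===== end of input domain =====

-- B replaces A's loop machinery by one max pass and the closed form k*max + k*(k-1)//2,
-- and validates every element (A's early return only ever checks nums[0]).

-- ===== PORT A =====
-- inner 'for j in range(k)' loop: state (summ, k); each round k = max(nums)+j; summ += k; k += 1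
def pvAInner (nums : List Int) : List Int → Int × Int → Int × Int
  | [], st => st
  | j :: js, (summ, kv) =>
      let k1 := (PySem.List.max? nums (fun x => x)).getD 0 + j   -- max(nums); nums nonempty where this runs
      let summ1 := summ + k1
      let k2 := k1 + 1
      pvAInner nums js (summ1, k2)

-- outer 'for i in range(len(nums))' loop; every executed iteration returns (some _)
def pvAOuter (nums : List Int) (k : Int) : Int → List Int → Option Int
  | _, [] => none
  | summ, i :: is =>
      match PySem.List.pyGet? nums i with
      | none => none
      | some v =>
        if 1 ≤ v ∧ v ≤ 100 then
          some (pvAInner nums (PySem.List.pyRange 0 k 1) (summ, k)).1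
        else some 0

def maximizeSum (nums : List Int) (k : Int) : Int :=
  if 1 ≤ k ∧ k ≤ 100 then
    if 1 ≤ (nums.length : Int) ∧ (nums.length : Int) ≤ 100 then
      (pvAOuter nums k 0 (PySem.List.pyRange 0 (nums.length : Int) 1)).getD 0
    else 0
  else 0

-- ===== PORT B =====
def maximizeSum_alt (nums : List Int) (k : Int) : Int :=
  if ¬ (1 ≤ k ∧ k ≤ 100 ∧ 1 ≤ (nums.length : Int) ∧ (nums.length : Int) ≤ 100) then 0
  else if nums.any (fun x => ¬ (1 ≤ x ∧ x ≤ 100)) then 0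
  else k * (PySem.List.max? nums (fun x => x)).getD 0 + PySem.Int.floordiv (k * (k - 1)) 2

-- ===== PRECONDITION & SPEC =====
-- On inputs with 1<=k<=100, 1<=len(nums)<=100, 1<=nums[0]<=100 but some later element outside
-- [1,100], A's early return skips validating those elements and returns k*max+k*(k-1)/2, while
-- B returns 0; B's is intended, A's loop merely returns before checking indices past 0.
def D_maximizeSum (nums : List Int) (k : Int) : Prop :=
  0 < k ∧ k < 101 ∧ 0 < nums.length ∧ nums.length < 101 ∧
  (∀ h ∈ nums.head?, 0 < h ∧ h < 101) ∧ ∃ x ∈ nums.tail, ¬ (0 < x ∧ x < 101)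
instance (nums : List Int) (k : Int) : Decidable (D_maximizeSum nums k) := by
  unfold D_maximizeSum; infer_instance

def Spec_maximizeSum (nums : List Int) (k : Int) (out : Int) : Prop :=
  ¬ D_maximizeSum nums k → out = maximizeSum_alt nums k
instance (nums : List Int) (k : Int) (out : Int) : Decidable (Spec_maximizeSum nums k out) := by
  unfold Spec_maximizeSum; infer_instance

def pvDiffWitness_maximizeSum : List Int × Int := ([2, 200], 3)
def pvDiffWitnessOut_maximizeSum : Int × Int := (603, 0)

-- ===== CLAIM (what is proved, stated in full; the proofs are below) =====
def Claim_unchanged_maximizeSum : Prop := ∀ (nums : List Int) (k : Int), Dom_maximizeSum nums k → Spec_maximizeSum nums k (maximizeSum nums k)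
def Claim_changed_maximizeSum : Prop := Dom_maximizeSum (pvDiffWitness_maximizeSum.1) (pvDiffWitness_maximizeSum.2) ∧ D_maximizeSum (pvDiffWitness_maximizeSum.1) (pvDiffWitness_maximizeSum.2) ∧ maximizeSum (pvDiffWitness_maximizeSum.1) (pvDiffWitness_maximizeSum.2) = pvDiffWitnessOut_maximizeSum.1 ∧ maximizeSum_alt (pvDiffWitness_maximizeSum.1) (pvDiffWitness_maximizeSum.2) = pvDiffWitnessOut_maximizeSum.2 ∧ pvDiffWitnessOut_maximizeSum.1 ≠ pvDiffWitnessOut_maximizeSum.2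
def Claim_exact_maximizeSum : Prop := ∀ (nums : List Int) (k : Int), Dom_maximizeSum nums k → D_maximizeSum nums k → maximizeSum nums k ≠ maximizeSum_alt nums k

-- ===== LEMMAS AND PROOFS =====

-- the inner loop adds Σ (mx + j) over the j-list to summ
theorem pvAInner_fst (nums : List Int) (js : List Int) (summ kv : Int) :
    (pvAInner nums js (summ, kv)).1 =
      summ + (js.map (fun j => (PySem.List.max? nums (fun x => x)).getD 0 + j)).sum := by
  induction js generalizing summ kv with
  | nil => simp [pvAInner]
  | cons j js ih => simp [pvAInner, ih]; ring

theorem sum_range_formula (m : Int) (n : Nat) :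
    (((PySem.List.pyRange 0 (n : Int) 1).map (fun j => m + j)).sum) =
      (n : Int) * m + PySem.Int.floordiv ((n : Int) * ((n : Int) - 1)) 2 := by
  induction n with
  | zero => simp [PySem.List.pyRange_zero_nat]
    | succ n ih =>
      have h : ((n : Int) + 1) = ((n + 1 : Nat) : Int) := by push_cast; ring
      rw [show ((n + 1 : Nat) : Int) = (n : Int) + 1 by push_cast; ring,
        PySem.List.pyRange_one_succ_right (by exact_mod_cast Nat.zero_le n)]
      simp only [List.map_append, List.sum_append, List.map_cons, List.map_nil,
        List.sum_cons, List.sum_nil, ih]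
      have e2 : PySem.Int.floordiv (((n : Int) + 1) * ((n : Int) + 1 - 1)) 2
          = PySem.Int.floordiv ((n : Int) * ((n : Int) - 1)) 2 + (n : Int) := by
        rw [PySem.Int.floordiv_eq_ediv_of_pos (by norm_num),
          PySem.Int.floordiv_eq_ediv_of_pos (by norm_num),
          show ((n : Int) + 1) * ((n : Int) + 1 - 1) = (n : Int) * ((n : Int) - 1) + (n : Int) * 2 by ring,
          Int.add_mul_ediv_right _ _ (by norm_num : (2:Int) ≠ 0)]
      rw [e2]; ring

-- A's value when all guards pass and the first element is in range
theorem maximizeSum_formula (a : Int) (rest : List Int) (k : Int)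
    (hk : 1 ≤ k ∧ k ≤ 100) (hlen : 1 ≤ ((a :: rest).length : Int) ∧ ((a :: rest).length : Int) ≤ 100)
    (ha : 1 ≤ a ∧ a ≤ 100) :
    maximizeSum (a :: rest) k =
      k * (PySem.List.max? (a :: rest) (fun x => x)).getD 0
        + PySem.Int.floordiv (k * (k - 1)) 2 := by
  have hcons : PySem.List.pyRange 0 (((a :: rest).length : Int)) 1
      = 0 :: PySem.List.pyRange 1 (((a :: rest).length : Int)) 1 := by
    exact PySem.List.pyRange_one_cons (by exact_mod_cast hlen.1)
  rw [maximizeSum, if_pos hk, if_pos hlen, hcons]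
  have hget : PySem.List.pyGet? (a :: rest) (0 : Int) = some a := by
    simp [PySem.List.pyGet?, PySem.List.pyIdx?]
  rw [pvAOuter, hget]
  simp only [if_pos ha, Option.getD_some]
  rw [pvAInner_fst]
  have hk0 : (0 : Int) ≤ k := by omega
  obtain ⟨n, hn⟩ := Int.eq_ofNat_of_zero_le hk0
  subst hn
  rw [sum_range_formula]
  ring

theorem maximizeSum_pos (a : Int) (rest : List Int) (k : Int)
    (hk : 1 ≤ k ∧ k ≤ 100) (hlen : 1 ≤ ((a :: rest).length : Int) ∧ ((a :: rest).length : Int) ≤ 100)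
    (ha : 1 ≤ a ∧ a ≤ 100) : 0 < maximizeSum (a :: rest) k := by
  rw [maximizeSum_formula a rest k hk hlen ha]
  have hm : PySem.List.max? (a :: rest) (fun x => x) = some (rest.foldl max a) :=
    PySem.List.max?_id_cons a rest
  have hma : a ≤ rest.foldl max a := (PySem.List.le_foldl_max rest a).1
  have hdiv : 0 ≤ PySem.Int.floordiv (k * (k - 1)) 2 := by
    rw [PySem.Int.floordiv_eq_ediv_of_pos (by norm_num)]
    have : 0 ≤ k * (k - 1) := mul_nonneg (by omega) (by omega)
    omega
  rw [hm]
  simp only [Option.getD_some]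
  nlinarith [hk.1, ha.1]

-- ===== VERDICT (by name: the statement is the Claim_ definition above) =====
theorem maximizeSum_spec : Claim_unchanged_maximizeSum := by
  intro nums k _ hnD
  by_cases hk : 1 ≤ k ∧ k ≤ 100
  · by_cases hlen : 1 ≤ (nums.length : Int) ∧ (nums.length : Int) ≤ 100
    · cases nums with
      | nil => simp at hlen
      | cons a rest =>
        by_cases ha : 1 ≤ a ∧ a ≤ 100
        · -- head in range; ¬D forces every element in range
          have hall : ∀ x ∈ rest, 1 ≤ x ∧ x ≤ 100 := by
            by_contra h
            push_neg at h
            obtain ⟨x, hx, hx1⟩ := h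
            have h1 := hlen.1; have h2 := hlen.2
            refine hnD ⟨by omega, by omega, by simp, by simp at h2 ⊢; omega, ?_, x, by simpa using hx, by omega⟩
            intro y hy
            simp only [List.head?_cons, Option.mem_def, Option.some.injEq] at hy
            subst hy
            omega
          have hany : (a :: rest).any (fun x => ¬ (1 ≤ x ∧ x ≤ 100)) = false := by
            simp only [List.any_eq_false, decide_eq_true_eq]
            intro x hxm hxn
            rcases List.mem_cons.mp hxm with rfl | hx
            · exact hxn ha
            · exact hxn (hall x hx)
          rw [maximizeSum_formula a rest k hk hlen ha]
          rw [maximizeSum_alt, if_neg (by push_neg; exact ⟨hk.1, hk.2, hlen.1, hlen.2⟩), if_neg (by intro h; rw [hany] at h; exact Bool.false_ne_true h)]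
        · -- head out of range: A returns 0, B's any-check fires
          have hcons : PySem.List.pyRange 0 (((a :: rest).length : Int)) 1
              = 0 :: PySem.List.pyRange 1 (((a :: rest).length : Int)) 1 :=
            PySem.List.pyRange_one_cons (by exact_mod_cast hlen.1)
          have hget : PySem.List.pyGet? (a :: rest) (0 : Int) = some a := by
            simp [PySem.List.pyGet?, PySem.List.pyIdx?]
          rw [maximizeSum, if_pos hk, if_pos hlen, hcons, pvAOuter, hget]
          simp only [if_neg ha, Option.getD_some]
          rw [maximizeSum_alt, if_neg (by push_neg; exact ⟨hk.1, hk.2, hlen.1, hlen.2⟩)]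
          rw [if_pos (by simp only [List.any_cons, Bool.or_eq_true, decide_eq_true_eq]; left; exact ha)]
    · rw [maximizeSum, if_pos hk, if_neg hlen,
        maximizeSum_alt, if_pos (by tauto)]
  · rw [maximizeSum, if_neg hk, maximizeSum_alt, if_pos (by tauto)]

theorem maximizeSum_changed : Claim_changed_maximizeSum := by
  unfold Claim_changed_maximizeSum; decide

theorem maximizeSum_tight : Claim_exact_maximizeSum := by
  intro nums k _ hD
  obtain ⟨hk1, hk2, hl1, hl2, hhI, x, hxtl, hxI⟩ := hD
  cases nums with
  | nil => simp at hl1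
  | cons a rest =>
    have hk : 1 ≤ k ∧ k ≤ 100 := ⟨by omega, by omega⟩
    have ha : 1 ≤ a ∧ a ≤ 100 := by have := hhI a (by simp); omega
    have hlen : 1 ≤ (((a :: rest).length : Int)) ∧ (((a :: rest).length : Int)) ≤ 100 := by
      simp only [List.length_cons] at hl2 ⊢
      constructor <;> (push_cast; omega)
    have hxmem : x ∈ a :: rest := by simp only [List.tail_cons] at hxtl; simp [hxtl]
    have hxbad : ¬ (1 ≤ x ∧ x ≤ 100) := by omega
    have hpos := maximizeSum_pos a rest k hk hlen ha
    have hB : maximizeSum_alt (a :: rest) k = 0 := by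
      rw [maximizeSum_alt, if_neg (by push_neg; exact ⟨hk.1, hk.2, hlen.1, hlen.2⟩),
        if_pos (by simp only [List.any_eq_true, decide_eq_true_eq]; exact ⟨x, hxmem, hxbad⟩)]
    rw [hB]
    omega
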